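-- pv_equiv track=rewrite | github.com/kuwoyuki/kadocalc | cardcalc/utils/max_subarray.py | max_subarray_dmg
-- ===== SOURCE A (Python) =====
-- def sum_dmg(xs):
--     return sum(x["amount"] for x in xs)
--
-- def max_subarray_dmg(xs, k):
--     n = len(xs)
--     if n < k:
--         k = n
--
--     best_start = 0
--     best_end = k
--     best_sum = 0
--     for i in range(k):
--         best_sum += sum_dmg(xs[i])
--
--     curr_sum = best_sum
--     for i in range(k, n):
--         curr_sum += sum_dmg(xs[i]) - sum_dmg(xs[i - k])
--         if curr_sum > best_sum:
--             best_sum = curr_sum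
--             best_start = i - k + 1  # actual current sum start idx
--             best_end = i + 1  # make it exclusive
--
--     return best_sum, best_start, best_end
-- ===== SOURCE B (Python) =====
-- def max_subarray_dmg(xs, k):
--     n = len(xs)
--     if k > n:
--         k = n
--     prefix = [0]
--     for day in xs:
--         prefix.append(prefix[-1] + sum(d["amount"] for d in day))
--     best_sum = prefix[k] - prefix[0]
--     best_start = 0
--     for start in range(1, n - k + 1):
--         s = prefix[start + k] - prefix[start]
--         if s > best_sum:
--             best_sum = s
--             best_start = start
--     return best_sum, best_start, best_start + k
-- ===== Notes on version B (the rewrite author's own statement) =====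
-- stated objective: alternative
-- what changed: Replaces A's sliding-window add/subtract loop (which re-evaluates each day's damage twice via sum_dmg on entry and exit of the window) by a precomputed prefix-sum array with each fixed-k window sum obtained as one subtraction prefix[start+k]-prefix[start].
import Mathlib
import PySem

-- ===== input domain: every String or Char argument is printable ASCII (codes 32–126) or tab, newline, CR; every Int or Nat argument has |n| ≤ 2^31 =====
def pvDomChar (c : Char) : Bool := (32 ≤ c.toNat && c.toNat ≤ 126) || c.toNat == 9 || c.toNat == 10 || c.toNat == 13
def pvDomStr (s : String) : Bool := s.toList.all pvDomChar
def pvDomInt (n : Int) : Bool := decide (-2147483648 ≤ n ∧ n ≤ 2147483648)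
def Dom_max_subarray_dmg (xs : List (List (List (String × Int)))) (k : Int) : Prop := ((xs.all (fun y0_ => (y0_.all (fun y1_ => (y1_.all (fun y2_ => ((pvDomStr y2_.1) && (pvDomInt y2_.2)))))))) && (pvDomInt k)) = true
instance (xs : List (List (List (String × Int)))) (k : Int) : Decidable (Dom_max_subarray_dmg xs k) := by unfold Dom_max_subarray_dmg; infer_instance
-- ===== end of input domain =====

-- B replaces A's sliding-window add/subtract loop by a prefix-sum array (each window sum
-- is one subtraction, each day's damage is summed once instead of twice): objective 'alternative'.

-- ===== PORT A =====
-- x["amount"]: first-match association-list lookup (the dict convention); the none case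
-- (Python KeyError) is excluded by Pre_, so .getD 0 is never the value used.
def sum_dmg (day : List (List (String × Int))) : Int :=
  day.foldl (fun acc x => acc + (((x.find? (fun p => p.1 == "amount")).map Prod.snd).getD 0)) 0

def max_subarray_dmg (xs : List (List (List (String × Int)))) (k : Int) : Int × Int × Int :=
  let n : Int := xs.length
  let k : Int := if n < k then n else k
  let best_start : Int := 0
  let best_end : Int := k
  -- for i in range(k): best_sum += sum_dmg(xs[i]); IndexError (none) excluded by Pre_
  let best_sum : Int := (PySem.List.pyRange 0 k 1).foldl
      (fun acc i => acc + sum_dmg (PySem.List.pyGetD xs i [])) 0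
  let curr_sum : Int := best_sum
  let st := (PySem.List.pyRange k n 1).foldl
      (fun (st : Int × Int × Int × Int) i =>
        let cs := st.2.2.2 + sum_dmg (PySem.List.pyGetD xs i []) - sum_dmg (PySem.List.pyGetD xs (i - k) [])
        if st.1 < cs then (cs, i - k + 1, i + 1, cs) else (st.1, st.2.1, st.2.2.1, cs))
      (best_sum, best_start, best_end, curr_sum)
  (st.1, st.2.1, st.2.2.1)

-- ===== PORT B =====
-- sum(d["amount"] for d in day) in Source B is the same per-day total; the port reuses sum_dmg
def max_subarray_dmg_alt (xs : List (List (List (String × Int)))) (k : Int) : Int × Int × Int :=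
  let n : Int := xs.length
  let k : Int := if n < k then n else k   -- if k > n: k = n
  -- prefix = [0]; for day in xs: prefix.append(prefix[-1] + sum(...))
  let pfx : List Int := xs.foldl
      (fun p day => p ++ [PySem.List.pyGetD p (-1) 0 + sum_dmg day]) [0]
  let best0 : Int × Int := (PySem.List.pyGetD pfx k 0 - PySem.List.pyGetD pfx 0 0, 0)
  let r := (PySem.List.pyRange 1 (n - k + 1) 1).foldl
      (fun (st : Int × Int) start =>
        let s := PySem.List.pyGetD pfx (start + k) 0 - PySem.List.pyGetD pfx start 0
        if st.1 < s then (s, start) else st) best0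
  (r.1, r.2, r.2 + k)

-- ===== PRECONDITION & SPEC =====
-- Pre_ excludes exactly the inputs where Python A raises: a negative k (the second loop then
-- reads xs[i-k] past the end / xs[i] on an empty list — IndexError on every such input), and
-- any damage dict without an "amount" key (KeyError). A returns on everything Pre_ admits.
def Pre_max_subarray_dmg (xs : List (List (List (String × Int)))) (k : Int) : Prop :=
  0 ≤ k ∧ ∀ day ∈ xs, ∀ d ∈ day, "amount" ∈ d.map Prod.fst
instance (xs : List (List (List (String × Int)))) (k : Int) : Decidable (Pre_max_subarray_dmg xs k) := by unfold Pre_max_subarray_dmg; infer_instance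

def pvWitness_max_subarray_dmg : (List (List (List (String × Int)))) × Int :=
  ([[[("amount", 3)]], [[("amount", 5)], [("amount", 2)]], [[("amount", 1)]]], 2)

def Spec_max_subarray_dmg (xs : List (List (List (String × Int)))) (k : Int) (out : Int × Int × Int) : Prop := out = max_subarray_dmg_alt xs k
instance (xs : List (List (List (String × Int)))) (k : Int) (out : Int × Int × Int) : Decidable (Spec_max_subarray_dmg xs k out) := by unfold Spec_max_subarray_dmg; infer_instance

-- ===== CLAIM (what is proved, stated in full; the proofs are below) =====
def Claim_equal_max_subarray_dmg : Prop := ∀ (xs : List (List (List (String × Int)))) (k : Int), Dom_max_subarray_dmg xs k → Pre_max_subarray_dmg xs k → Spec_max_subarray_dmg xs k (max_subarray_dmg xs k)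

-- ===== LEMMAS AND PROOFS =====

-- pvP xs j = total damage of the first j days
def pvP (xs : List (List (List (String × Int)))) (j : Nat) : Int :=
  ((List.range j).map (fun i => sum_dmg (xs.getD i []))).sum

-- pvW xs K t = damage of the window of K days starting at day t
def pvW (xs : List (List (List (String × Int)))) (K t : Nat) : Int :=
  pvP xs (t + K) - pvP xs t

-- running maximum with earliest argmax over windows 0..m
def pvBest (xs : List (List (List (String × Int)))) (K m : Nat) : Int × Nat :=
  (List.range m).foldl
    (fun st t => if st.1 < pvW xs K (t + 1) then (pvW xs K (t + 1), t + 1) else st)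
    (pvW xs K 0, 0)

-- the prefix list B builds, as a structural recursion
def pvPsums (c : Int) : List (List (List (String × Int))) → List Int
  | [] => [c]
  | d :: l => c :: pvPsums (c + sum_dmg d) l

theorem pvP_zero (xs : List (List (List (String × Int)))) : pvP xs 0 = 0 := rfl

theorem pvP_succ (xs : List (List (List (String × Int)))) (j : Nat) :
    pvP xs (j + 1) = pvP xs j + sum_dmg (xs.getD j []) := by
  simp [pvP, List.range_succ]

theorem pvW_zero (xs : List (List (List (String × Int)))) (K : Nat) :
    pvW xs K 0 = pvP xs K := by
  simp [pvW, pvP_zero]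

theorem pvW_succ (xs : List (List (List (String × Int)))) (K t : Nat) :
    pvW xs K (t + 1) = pvW xs K t + sum_dmg (xs.getD (K + t) []) - sum_dmg (xs.getD t []) := by
  have h : t + 1 + K = (t + K) + 1 := by omega
  have h2 : K + t = t + K := by omega
  simp only [pvW, h, h2, pvP_succ]
  ring

theorem pvBest_zero (xs : List (List (List (String × Int)))) (K : Nat) :
    pvBest xs K 0 = (pvW xs K 0, 0) := rfl

theorem pvBest_succ (xs : List (List (List (String × Int)))) (K m : Nat) :
    pvBest xs K (m + 1) =
      if (pvBest xs K m).1 < pvW xs K (m + 1) then (pvW xs K (m + 1), m + 1)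
      else pvBest xs K m := by
  simp [pvBest, List.range_succ]

-- A's first loop computes pvP xs K
theorem loopA_init (xs : List (List (List (String × Int)))) (K : Nat) :
    (PySem.List.pyRange 0 (K : Int) 1).foldl
      (fun acc i => acc + sum_dmg (PySem.List.pyGetD xs i [])) 0 = pvP xs K := by
  induction K with
  | zero => simp [PySem.List.pyRange_one_eq_nil, pvP_zero]
  | succ K ih =>
    have hcast : ((K + 1 : Nat) : Int) = (K : Int) + 1 := by push_cast; ring
    rw [hcast, PySem.List.pyRange_one_succ_right (by omega), List.foldl_append, ih]
    simp [pvP_succ]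

-- A's sliding-window loop maintains (best, start, start+K, current window)
theorem loopA (xs : List (List (List (String × Int)))) (K : Nat) (m : Nat) :
    (PySem.List.pyRange (K : Int) ((K : Int) + (m : Int)) 1).foldl
      (fun (st : Int × Int × Int × Int) i =>
        let cs := st.2.2.2 + sum_dmg (PySem.List.pyGetD xs i []) - sum_dmg (PySem.List.pyGetD xs (i - (K : Int)) [])
        if st.1 < cs then (cs, i - (K : Int) + 1, i + 1, cs) else (st.1, st.2.1, st.2.2.1, cs))
      (pvP xs K, 0, (K : Int), pvP xs K)
    = ((pvBest xs K m).1, ((pvBest xs K m).2 : Int), ((pvBest xs K m).2 : Int) + (K : Int), pvW xs K m) := by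
  induction m with
  | zero =>
    rw [show ((K : Int) + (0 : Nat)) = (K : Int) by push_cast; ring]
    rw [PySem.List.pyRange_one_eq_nil le_rfl]
    simp [pvBest_zero, pvW_zero]
  | succ m ih =>
    have hcast : (K : Int) + ((m + 1 : Nat) : Int) = ((K : Int) + (m : Int)) + 1 := by push_cast; ring
    rw [hcast, PySem.List.pyRange_one_succ_right (by omega), List.foldl_append, ih]
    have hidx : (K : Int) + (m : Int) = ((K + m : Nat) : Int) := by push_cast; ring
    simp only [List.foldl_cons, List.foldl_nil]
    rw [pvBest_succ]
    have hget1 : PySem.List.pyGetD xs ((K : Int) + (m : Int)) [] = xs.getD (K + m) [] := by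
      rw [hidx, PySem.List.pyGetD_natCast]
    have hget2 : PySem.List.pyGetD xs ((K : Int) + (m : Int) - (K : Int)) [] = xs.getD m [] := by
      rw [show (K : Int) + (m : Int) - (K : Int) = (m : Int) by ring, PySem.List.pyGetD_natCast]
    simp only [hget1, hget2]
    have hcs : pvW xs K m + sum_dmg (xs.getD (K + m) []) - sum_dmg (xs.getD m []) = pvW xs K (m + 1) :=
      (pvW_succ xs K m).symm
    simp only [hcs]
    split_ifs with h
    · refine Prod.ext rfl (Prod.ext ?_ (Prod.ext ?_ rfl)) <;> push_cast <;> ring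
    · rfl

-- B's fold builds the prefix-sum list pvPsums
theorem prefix_fold (l : List (List (List (String × Int)))) :
    ∀ (p : List Int) (c : Int),
      l.foldl (fun p day => p ++ [PySem.List.pyGetD p (-1) 0 + sum_dmg day]) (p ++ [c])
        = p ++ pvPsums c l := by
  induction l with
  | nil => intro p c; simp [pvPsums]
  | cons d l ih =>
    intro p c
    simp only [List.foldl_cons, PySem.List.pyGetD_neg_one_append_singleton]
    rw [show (p ++ [c]) ++ [c + sum_dmg d] = (p ++ [c]) ++ [c + sum_dmg d] from rfl,
        ih (p ++ [c]) (c + sum_dmg d)]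
    simp [pvPsums]

theorem prefix_fold_zero (xs : List (List (List (String × Int)))) :
    xs.foldl (fun p day => p ++ [PySem.List.pyGetD p (-1) 0 + sum_dmg day]) [0]
      = pvPsums 0 xs := by
  have := prefix_fold xs [] 0
  simpa using this

theorem pvPsums_getD (l : List (List (List (String × Int)))) :
    ∀ (c : Int) (j : Nat), j ≤ l.length →
      (pvPsums c l).getD j 0 = c + ((l.take j).map sum_dmg).sum := by
  induction l with
  | nil =>
    intro c j hj
    have hj0 : j = 0 := by simpa using hj
    subst hj0
    simp [pvPsums]
  | cons d l ih =>
    intro c j hj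
    cases j with
    | zero => simp [pvPsums]
    | succ j =>
      simp only [pvPsums, List.getD_cons_succ, List.take_succ_cons, List.map_cons, List.sum_cons]
      rw [ih (c + sum_dmg d) j (by simpa using hj)]
      ring

theorem take_sum_eq_pvP (xs : List (List (List (String × Int)))) :
    ∀ (j : Nat), j ≤ xs.length → ((xs.take j).map sum_dmg).sum = pvP xs j := by
  intro j
  induction j with
  | zero => intro _; simp [pvP_zero]
  | succ j ih =>
    intro hj
    have hj' : j < xs.length := by omega
    rw [List.take_add_one, List.map_append, List.sum_append, ih (by omega), pvP_succ]
    have : xs[j]? = some xs[j] := List.getElem?_eq_getElem hj'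
    simp [this, List.getD_eq_getElem?_getD]

-- indexing into the built prefix list gives pvP
theorem psums_pyGetD (xs : List (List (List (String × Int)))) (j : Nat) (hj : j ≤ xs.length) :
    PySem.List.pyGetD (pvPsums 0 xs) (j : Int) 0 = pvP xs j := by
  rw [PySem.List.pyGetD_natCast, pvPsums_getD xs 0 j hj, take_sum_eq_pvP xs j hj]
  ring

-- B's scan over window starts computes the same running maximum
theorem loopB (xs : List (List (List (String × Int)))) (K : Nat) (hK : K ≤ xs.length) :
    ∀ (m : Nat), m ≤ xs.length - K →
    (PySem.List.pyRange 1 ((m : Int) + 1) 1).foldl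
      (fun (st : Int × Int) start =>
        let s := PySem.List.pyGetD (pvPsums 0 xs) (start + (K : Int)) 0
                  - PySem.List.pyGetD (pvPsums 0 xs) start 0
        if st.1 < s then (s, start) else st)
      (pvW xs K 0, 0)
    = ((pvBest xs K m).1, ((pvBest xs K m).2 : Int)) := by
  intro m
  induction m with
  | zero =>
    intro _
    rw [show ((0 : Nat) : Int) + 1 = 1 by norm_num, PySem.List.pyRange_one_eq_nil le_rfl]
    simp [pvBest_zero]
  | succ m ih =>
    intro hm
    have hcast : ((m + 1 : Nat) : Int) + 1 = ((m : Int) + 1) + 1 := by push_cast; ring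
    rw [hcast, PySem.List.pyRange_one_succ_right (by omega), List.foldl_append,
        ih (by omega)]
    simp only [List.foldl_cons, List.foldl_nil]
    rw [pvBest_succ]
    have h1 : PySem.List.pyGetD (pvPsums 0 xs) ((m : Int) + 1 + (K : Int)) 0 = pvP xs (m + 1 + K) := by
      rw [show (m : Int) + 1 + (K : Int) = ((m + 1 + K : Nat) : Int) by push_cast; ring]
      exact psums_pyGetD xs _ (by omega)
    have h2 : PySem.List.pyGetD (pvPsums 0 xs) ((m : Int) + 1) 0 = pvP xs (m + 1) := by
      rw [show (m : Int) + 1 = ((m + 1 : Nat) : Int) by push_cast; ring]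
      exact psums_pyGetD xs _ (by omega)
    simp only [h1, h2]
    have hs : pvP xs (m + 1 + K) - pvP xs (m + 1) = pvW xs K (m + 1) := by
      simp [pvW]
    simp only [hs]
    split_ifs with h
    · exact Prod.ext rfl (by push_cast; ring)
    · rfl

-- ===== VERDICT (by name: the statement is the Claim_ definition above) =====
theorem max_subarray_dmg_spec : Claim_equal_max_subarray_dmg := by
  intro xs k _hdom hpre
  obtain ⟨hk, -⟩ := hpre
  simp only [Spec_max_subarray_dmg, max_subarray_dmg, max_subarray_dmg_alt]
  set n : Nat := xs.length with hn
  set c : Int := if (n : Int) < k then (n : Int) else k with hc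
  have hc0 : 0 ≤ c := by rw [hc]; split_ifs <;> omega
  have hcn : c ≤ (n : Int) := by rw [hc]; split_ifs <;> omega
  set K : Nat := c.toNat with hKdef
  have hcK : c = (K : Int) := by rw [hKdef, Int.toNat_of_nonneg hc0]
  have hKn : K ≤ n := by omega
  rw [hcK]
  rw [loopA_init xs K]
  rw [show ((n : Int)) = (K : Int) + ((n - K : Nat) : Int) by omega]
  rw [loopA xs K (n - K)]
  rw [prefix_fold_zero xs]
  have g0 : PySem.List.pyGetD (pvPsums 0 xs) (0 : Int) 0 = pvP xs 0 := by
    have h := psums_pyGetD xs 0 (Nat.zero_le n)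
    norm_num at h
    exact h
  rw [g0, psums_pyGetD xs K hKn]
  rw [show pvP xs K - pvP xs 0 = pvW xs K 0 by simp [pvW_zero, pvP_zero]]
  rw [show (K : Int) + ((n - K : Nat) : Int) - (K : Int) + 1 = ((n - K : Nat) : Int) + 1 by ring]
  rw [loopB xs K hKn (n - K) le_rfl]
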